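-- pv_equiv track=rewrite | github.com/patterns-app/patterns-devkit | snapflow/utils/data.py | records_as_dict_of_lists
-- ===== SOURCE A (Python) =====
-- from typing import (
--     IO,
--     TYPE_CHECKING,
--     Any,
--     AnyStr,
--     Dict,
--     Generator,
--     Generic,
--     Iterable,
--     Iterator,
--     List,
--     Optional,
--     Union,
-- )
--
-- def records_as_dict_of_lists(dl: List[Dict]) -> Dict[str, List]:
--     series: Dict[str, List] = {}
--     for r in dl:
--         for k, v in r.items():
--             if k in series:
--                 series[k].append(v)
--             else:
--                 series[k] = [v]
--     return series
-- ===== SOURCE B (Python) =====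
-- def records_as_dict_of_lists(dl):
--     keys = list(dict.fromkeys(k for r in dl for k in r))
--     return {k: [r[k] for r in dl if k in r] for k in keys}
-- ===== Notes on version B (the rewrite author's own statement) =====
-- stated objective: alternative
-- what changed: B first collects the distinct keys in first-appearance order, then builds the result column-by-column with one comprehension per key, instead of A's single row-major pass that appends into a growing dict.
import Mathlib
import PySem

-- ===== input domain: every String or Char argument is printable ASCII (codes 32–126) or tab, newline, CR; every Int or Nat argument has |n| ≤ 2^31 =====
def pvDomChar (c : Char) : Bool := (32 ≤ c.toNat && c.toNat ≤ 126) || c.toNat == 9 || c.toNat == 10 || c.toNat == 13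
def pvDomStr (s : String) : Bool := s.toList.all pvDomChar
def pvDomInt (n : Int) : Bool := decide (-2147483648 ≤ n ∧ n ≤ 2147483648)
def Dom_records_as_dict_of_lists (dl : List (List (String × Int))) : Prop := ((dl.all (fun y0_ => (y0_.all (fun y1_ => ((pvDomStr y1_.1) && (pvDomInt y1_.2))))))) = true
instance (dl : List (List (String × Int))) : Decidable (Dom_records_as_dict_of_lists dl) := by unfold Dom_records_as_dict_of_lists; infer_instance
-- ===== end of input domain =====

-- B collects the distinct keys first (first-appearance order) and then builds the result
-- column-by-column, one pass over the records per key, instead of A's row-major append pass.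

-- ===== PORT A =====
-- the body of A's inner loop: 'if k in series: series[k].append(v) else: series[k] = [v]'
def pvStepA (d : PySem.Dict String (List Int)) (kv : String × Int) : PySem.Dict String (List Int) :=
  if d.contains kv.1 then d.modify kv.1 [] (fun vs => vs ++ [kv.2]) else d.insert kv.1 [kv.2]

def records_as_dict_of_lists (dl : List (List (String × Int))) : List (String × List Int) :=
  (dl.foldl (fun d r => r.foldl pvStepA d) PySem.Dict.empty).items

-- ===== PORT B =====
def records_as_dict_of_lists_alt (dl : List (List (String × Int))) : List (String × List Int) :=
  let keys := PySem.List.dedup (dl.flatMap (fun r => r.map Prod.fst))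
  keys.map (fun k => (k, dl.filterMap (fun r => (r.find? (fun p => p.1 == k)).map Prod.snd)))

-- ===== PRECONDITION & SPEC =====
-- Each record models a Python dict, whose keys are necessarily distinct; association lists
-- with a duplicated key inside one record represent no Python input and are excluded.
def Pre_records_as_dict_of_lists (dl : List (List (String × Int))) : Prop :=
  ∀ r ∈ dl, (r.map Prod.fst).Nodup
instance (dl : List (List (String × Int))) : Decidable (Pre_records_as_dict_of_lists dl) := by
  unfold Pre_records_as_dict_of_lists; infer_instance
def pvWitness_records_as_dict_of_lists : (List (List (String × Int))) :=
  [[("a", 1), ("b", 2)], [("a", 3)], []]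

def Spec_records_as_dict_of_lists (dl : List (List (String × Int))) (out : List (String × List Int)) : Prop := out = records_as_dict_of_lists_alt dl
instance (dl : List (List (String × Int))) (out : List (String × List Int)) : Decidable (Spec_records_as_dict_of_lists dl out) := by unfold Spec_records_as_dict_of_lists; infer_instance

-- ===== CLAIM (what is proved, stated in full; the proofs are below) =====
def Claim_equal_records_as_dict_of_lists : Prop := ∀ (dl : List (List (String × Int))), Dom_records_as_dict_of_lists dl → Pre_records_as_dict_of_lists dl → Spec_records_as_dict_of_lists dl (records_as_dict_of_lists dl)

-- ===== LEMMAS AND PROOFS =====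

-- A's branched step is exactly a 'modify with default []' (insert of a fresh key appends).
lemma pvStepA_eq_modify (d : PySem.Dict String (List Int)) (kv : String × Int) :
    pvStepA d kv = d.modify kv.1 [] (fun vs => vs ++ [kv.2]) := by
  unfold pvStepA PySem.Dict.modify PySem.Dict.getD
  by_cases h : d.contains kv.1 = true
  · simp [h]
  · simp [Bool.not_eq_true] at h
    simp [h, (PySem.Dict.get?_eq_none_iff_contains d kv.1).mpr h]

-- within one record with distinct keys, the pairs at key k are exactly the first find
lemma filter_key_eq_find (r : List (String × Int)) (k : String)
    (h : (r.map Prod.fst).Nodup) :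
    (r.filter (fun p => p.1 == k)).map Prod.snd
      = ((r.find? (fun p => p.1 == k)).map Prod.snd).toList := by
  induction r with
  | nil => simp
  | cons p0 rest ih =>
    simp only [List.map_cons, List.nodup_cons] at h
    by_cases hk : (p0.1 == k) = true
    · have hk' : p0.1 = k := by simpa using hk
      have : rest.filter (fun p => p.1 == k) = [] := by
        rw [List.filter_eq_nil_iff]
        intro p hp hpk
        exact h.1 (by rw [hk', ← show p.1 = k from by simpa using hpk]; exact List.mem_map_of_mem hp)
      simp [hk, this]
    · simp only [List.filter_cons, List.find?_cons, hk]
      exact ih h.2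

-- the per-key column: row-major pairs at key k = B's column for k
lemma column_eq (dl : List (List (String × Int))) (k : String)
    (h : ∀ r ∈ dl, (r.map Prod.fst).Nodup) :
    ((dl.flatten.filter (fun p => p.1 == k)).map Prod.snd)
      = dl.filterMap (fun r => (r.find? (fun p => p.1 == k)).map Prod.snd) := by
  induction dl with
  | nil => simp
  | cons r dl ih =>
    simp only [List.flatten_cons, List.filter_append, List.map_append, List.filterMap_cons]
    rw [filter_key_eq_find r k (h r (by simp)), ih (fun r hr => h r (by simp [hr]))]
    cases r.find? (fun p => p.1 == k) <;> simp

theorem records_as_dict_of_lists_spec' (dl : List (List (String × Int)))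
    (hpre : Pre_records_as_dict_of_lists dl) :
    records_as_dict_of_lists dl = records_as_dict_of_lists_alt dl := by
  unfold records_as_dict_of_lists records_as_dict_of_lists_alt
  have hfold : dl.foldl (fun d r => r.foldl pvStepA d) PySem.Dict.empty
      = dl.flatten.foldl (fun d p => d.modify p.1 [] (fun vs => vs ++ [p.2])) PySem.Dict.empty := by
    rw [List.foldl_flatten]
    exact PySem.List.foldl_congr_mem _ _ _ _ (fun d r _ =>
      PySem.List.foldl_congr_mem _ _ _ _ (fun d' kv _ => pvStepA_eq_modify d' kv))
  rw [hfold]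
  set D := dl.flatten.foldl (fun d p => d.modify p.1 [] (fun vs => vs ++ [p.2])) PySem.Dict.empty with hD
  have hkeys : D.keys = PySem.List.dedup (dl.flatMap (fun r => r.map Prod.fst)) := by
    rw [hD, PySem.Dict.keys_foldl_modify_key (key := Prod.fst)
      (f := fun _ p => fun vs => vs ++ [p.2])]
    simp [PySem.Dict.keys_empty, PySem.Set.update, PySem.Set.ofList_eq_foldl,
      PySem.List.dedup_eq_ofList, List.flatMap_def, List.map_flatten]
  have hnodup : D.keys.Nodup := by
    rw [hD]
    exact PySem.Dict.nodup_keys_foldl_modify_key _ _ _ _ _ PySem.Dict.nodup_keys_empty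
  rw [PySem.Dict.items_eq_map_keys D hnodup [], hkeys]
  refine List.map_congr_left (fun k _ => ?_)
  have := PySem.Dict.getD_foldl_modify_append (l := dl.flatten) (d := PySem.Dict.empty) (c := k)
  rw [hD, this, PySem.Dict.getD_empty, List.nil_append, column_eq dl k hpre]

-- ===== VERDICT (by name: the statement is the Claim_ definition above) =====
theorem records_as_dict_of_lists_spec : Claim_equal_records_as_dict_of_lists := by
  intro dl _ hpre
  exact records_as_dict_of_lists_spec' dl hpre
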